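-- pv_equiv track=rewrite | github.com/Ian-au789/SSAFY_TIL_APS_basic | List/02_05/Gravity.py | highest_drop
-- ===== SOURCE A (Python) =====
-- def highest_drop(N, box_list):
--
--     max_fall = 0                                  # 최대 낙차 저장할 변수
--
--     for i in range(0, len(box_list)-1):           # 처음부터 마지막 2번째까지 (마지막은 비교할 대상이 없음)
--         count = 1                                 # 자기 자신은 기본 포함
--
--         for j in range(i+1, len(box_list)):       # 그 앞에 있는 나머지 상자 전부
--
--             if box_list[i] <= box_list[j]:
--                 count += 1                        # 상자의 높이가 더 높거나 같을 경우에만 낙차를 줄게함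
--
--
--         fall = N-(i+count)
--
--         if max_fall < fall:                       # 최댓값 저장
--             max_fall = fall
--
--     return max_fall
-- ===== SOURCE B (Python) =====
-- def highest_drop(N, box_list):
--     # one right-to-left pass keeping the already-seen suffix in a sorted list;
--     # the count of later boxes >= current height comes from a binary search
--     best = 0
--     s = box_list[-1:]
--     for i in range(len(box_list) - 2, -1, -1):
--         x = box_list[i]
--         lo, hi = 0, len(s)          # bisect_left on the sorted suffix
--         while lo < hi:
--             mid = (lo + hi) // 2
--             if s[mid] < x:
--                 lo = mid + 1
--             else:
--                 hi = mid
--         fall = N - (i + 1 + (len(s) - lo))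
--         if best < fall:
--             best = fall
--         s.insert(lo, x)
--     return best
-- ===== Notes on version B (the rewrite author's own statement) =====
-- stated objective: faster
-- what changed: Instead of re-scanning the whole tail for each box, B makes one right-to-left pass that keeps the already-seen suffix as a sorted list and gets the count of later boxes >= the current height from a binary search (bisect_left), inserting the current height to maintain order.
import Mathlib
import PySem

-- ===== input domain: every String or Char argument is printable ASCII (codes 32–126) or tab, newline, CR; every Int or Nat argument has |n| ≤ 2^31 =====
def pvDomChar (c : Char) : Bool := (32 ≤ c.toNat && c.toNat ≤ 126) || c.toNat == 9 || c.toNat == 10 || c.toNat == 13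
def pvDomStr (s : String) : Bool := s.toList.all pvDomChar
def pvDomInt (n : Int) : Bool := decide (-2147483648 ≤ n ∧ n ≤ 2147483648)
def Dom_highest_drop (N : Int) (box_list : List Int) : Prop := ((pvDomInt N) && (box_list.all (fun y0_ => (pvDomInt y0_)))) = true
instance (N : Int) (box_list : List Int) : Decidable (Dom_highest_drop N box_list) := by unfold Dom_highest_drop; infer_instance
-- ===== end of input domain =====

-- B replaces A's nested rescans of the tail by one right-to-left pass over a sorted suffix with binary search (faster).

-- ===== PORT A =====
def highest_drop (N : Int) (box_list : List Int) : Int :=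
  (PySem.List.pyRange 0 (PySem.List.len box_list - 1)).foldl (fun max_fall i =>
    let count : Int :=
      (PySem.List.pyRange (i + 1) (PySem.List.len box_list)).foldl
        (fun count j =>
          if PySem.List.pyGetD box_list i 0 ≤ PySem.List.pyGetD box_list j 0 then count + 1
          else count) 1
    let fall := N - (i + count)
    if max_fall < fall then fall else max_fall) 0

-- ===== PORT B =====
-- Source B's hand-written lo/hi halving loop is exactly bisect_left's loop; it is ported as
-- PySem.List.bisectLeft, which is that same loop (lo/hi, mid = (lo+hi)/2, branch on s[mid] < x).
def hdAltLoop (N : Int) (box_list : List Int) : List Int → Int → List Int → Int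
  | [], best, _ => best
  | i :: rest, best, s =>
    let x := PySem.List.pyGetD box_list i 0
    let lo := PySem.List.bisectLeft s x
    let fall := N - (i + 1 + (PySem.List.len s - (lo : Int)))
    hdAltLoop N box_list rest (if best < fall then fall else best)
      (PySem.List.insert s (lo : Int) x)

def highest_drop_alt (N : Int) (box_list : List Int) : Int :=
  hdAltLoop N box_list (PySem.List.pyRange (PySem.List.len box_list - 2) (-1) (-1)) 0
    (PySem.List.slice box_list (some (-1)) none)

-- ===== PRECONDITION & SPEC =====
def Spec_highest_drop (N : Int) (box_list : List Int) (out : Int) : Prop := out = highest_drop_alt N box_list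
instance (N : Int) (box_list : List Int) (out : Int) : Decidable (Spec_highest_drop N box_list out) := by unfold Spec_highest_drop; infer_instance

-- ===== CLAIM (what is proved, stated in full; the proofs are below) =====
def Claim_equal_highest_drop : Prop := ∀ (N : Int) (box_list : List Int), Dom_highest_drop N box_list → Spec_highest_drop N box_list (highest_drop N box_list)

-- ===== LEMMAS AND PROOFS =====

-- value A computes for index i: the "fall" of box i
def gVal (N : Int) (xs : List Int) (i : Int) : Int :=
  N - (i + 1 + ((xs.drop (i + 1).toNat).countP (fun y => decide (PySem.List.pyGetD xs i 0 ≤ y)) : Int))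

lemma A_eq (N : Int) (xs : List Int) :
    highest_drop N xs =
      (PySem.List.pyRange 0 (PySem.List.len xs - 1)).foldl
        (fun m i => if m < gVal N xs i then gVal N xs i else m) 0 := by
  unfold highest_drop
  refine PySem.List.foldl_congr_mem _ _ _ _ ?_
  intro acc i hi
  have h0 : 0 ≤ i := (PySem.List.mem_pyRange_one.mp hi).1
  rw [PySem.List.foldl_pyRange_pyGetD xs 0
    (fun c y => if PySem.List.pyGetD xs i 0 ≤ y then c + 1 else c) 1 (by omega)]
  rw [PySem.List.foldl_ite_add_one]
  unfold gVal
  have : N - (i + (1 + ((List.drop (i + 1).toNat xs).countP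
      (fun y => decide (PySem.List.pyGetD xs i 0 ≤ y)) : Int)))
      = N - (i + 1 + ((List.drop (i + 1).toNat xs).countP
      (fun y => decide (PySem.List.pyGetD xs i 0 ≤ y)) : Int)) := by ring
  simp only [this]

lemma bisect_count (s : List Int) (x : Int) (hs : s.Pairwise (· ≤ ·)) :
    PySem.List.bisectLeft s x ≤ s.length ∧
      s.countP (fun y => decide (x ≤ y)) = s.length - PySem.List.bisectLeft s x := by
  obtain ⟨hle, hlt, hge⟩ := PySem.List.bisectLeft_spec s x hs
  refine ⟨hle, ?_⟩
  set k := PySem.List.bisectLeft s x with hk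
  have h1 : (s.take k).countP (fun y => decide (x ≤ y)) = 0 := by
    apply List.countP_eq_zero.mpr
    intro a ha
    obtain ⟨j, hj, hja⟩ := List.mem_iff_getElem.mp ha
    have hjk : j < k := lt_of_lt_of_le hj (by simp)
    have hjs : j < s.length := lt_of_lt_of_le hjk hle
    have := hlt j hjs hjk
    rw [List.getElem_take] at hja
    simp only [decide_eq_true_eq]
    omega
  have h2 : (s.drop k).countP (fun y => decide (x ≤ y)) = (s.drop k).length := by
    apply List.countP_eq_length.mpr
    intro a ha
    obtain ⟨j, hj, hja⟩ := List.mem_iff_getElem.mp ha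
    have hjs : k + j < s.length := by simp at hj; omega
    have := hge (k + j) hjs (by omega)
    rw [List.getElem_drop] at hja
    simp only [decide_eq_true_eq]
    omega
  have h3 := List.take_append_drop k s
  calc s.countP (fun y => decide (x ≤ y))
      = ((s.take k) ++ (s.drop k)).countP (fun y => decide (x ≤ y)) := by rw [h3]
    _ = s.length - k := by
        rw [List.countP_append, h1, h2, List.length_drop]; omega

lemma insert_sorted (s : List Int) (x : Int) (hs : s.Pairwise (· ≤ ·)) :
    (PySem.List.insert s ((PySem.List.bisectLeft s x : Nat) : Int) x).Pairwise (· ≤ ·) ∧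
      (PySem.List.insert s ((PySem.List.bisectLeft s x : Nat) : Int) x).Perm (x :: s) := by
  obtain ⟨hle, hlt, hge⟩ := PySem.List.bisectLeft_spec s x hs
  set k := PySem.List.bisectLeft s x with hk
  rw [PySem.List.insert_natCast s k x hle]
  constructor
  · have hsplit : (s.take k ++ s.drop k).Pairwise (fun a b => a ≤ b) := by
      rw [List.take_append_drop]; exact hs
    rw [List.pairwise_append] at hsplit
    obtain ⟨hpt, hpd, hcross⟩ := hsplit
    rw [List.pairwise_append]
    refine ⟨hpt, ?_, ?_⟩
    · rw [List.pairwise_cons]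
      refine ⟨?_, hpd⟩
      intro a ha
      obtain ⟨j, hj, hja⟩ := List.mem_iff_getElem.mp ha
      have hjs : k + j < s.length := by simp at hj; omega
      have := hge (k + j) hjs (by omega)
      rw [List.getElem_drop] at hja
      omega
    · intro a ha b hb
      rcases List.mem_cons.mp hb with hb | hb
      · subst hb
        obtain ⟨j, hj, hja⟩ := List.mem_iff_getElem.mp ha
        have hjk : j < k := lt_of_lt_of_le hj (by simp)
        have hjs : j < s.length := lt_of_lt_of_le hjk hle
        have := hlt j hjs hjk
        rw [List.getElem_take] at hja
        omega
      · exact hcross a ha b hb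
  · have h := List.perm_middle (a := x) (l₁ := s.take k) (l₂ := s.drop k)
    rw [List.take_append_drop] at h
    exact h

lemma fm_out (g : Int → Int) : ∀ (l : List Int) (b c : Int),
    l.foldl (fun m j => max m (g j)) (max b c) = max (l.foldl (fun m j => max m (g j)) b) c := by
  intro l
  induction l with
  | nil => intro b c; rfl
  | cons a l ih =>
    intro b c
    simp only [List.foldl_cons]
    rw [show max (max b c) (g a) = max (max b (g a)) c by omega, ih]

lemma fm_rev (g : Int → Int) : ∀ (l : List Int) (b : Int),
    l.reverse.foldl (fun m j => max m (g j)) b = l.foldl (fun m j => max m (g j)) b := by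
  intro l
  induction l with
  | nil => intro b; rfl
  | cons a l ih =>
    intro b
    simp only [List.reverse_cons, List.foldl_append, List.foldl_cons, List.foldl_nil]
    rw [ih, ← fm_out, max_comm b (g a), fm_out g l (g a) b, max_comm]

lemma loop_eq (N : Int) (xs : List Int) : ∀ (t : Nat), t ≤ xs.length → ∀ (best : Int) (s : List Int),
    s.Pairwise (· ≤ ·) → s.Perm (xs.drop t) →
    hdAltLoop N xs (PySem.List.pyRange ((t : Int) - 1) (-1) (-1)) best s =
      ((PySem.List.pyRange 0 (t : Int)).reverse).foldl
        (fun m j => if m < gVal N xs j then gVal N xs j else m) best := by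
  intro t
  induction t with
  | zero =>
    intro ht best s hsort hperm
    rw [PySem.List.pyRange_neg_one_eq_nil (by omega), PySem.List.pyRange_one_eq_nil (by omega)]
    rfl
  | succ t ih =>
    intro ht best s hsort hperm
    have htn : t < xs.length := by omega
    have hc : (((t + 1 : Nat) : Int)) - 1 = (t : Int) := by push_cast; ring
    rw [hc, PySem.List.pyRange_neg_one_cons (show (-1 : Int) < (t : Int) by omega)]
    simp only [hdAltLoop]
    have hx : PySem.List.pyGetD xs ((t : Nat) : Int) 0 = xs[t] := by
      rw [PySem.List.pyGetD_natCast]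
      exact List.getD_eq_getElem xs 0 htn
    obtain ⟨hlo, hcnt⟩ := bisect_count s (PySem.List.pyGetD xs ((t : Nat) : Int) 0) hsort
    obtain ⟨hsort', hperm'⟩ := insert_sorted s (PySem.List.pyGetD xs ((t : Nat) : Int) 0) hsort
    have hperm2 : (PySem.List.insert s ((PySem.List.bisectLeft s (PySem.List.pyGetD xs ((t : Nat) : Int) 0) : Nat) : Int)
        (PySem.List.pyGetD xs ((t : Nat) : Int) 0)).Perm (xs.drop t) := by
      refine hperm'.trans ((hperm.cons _).trans ?_)
      rw [hx, List.getElem_cons_drop htn]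
    have hfall : N - (((t : Nat) : Int) + 1 + (PySem.List.len s
        - (PySem.List.bisectLeft s (PySem.List.pyGetD xs ((t : Nat) : Int) 0) : Int)))
        = gVal N xs ((t : Nat) : Int) := by
      unfold gVal
      have hpc := hperm.countP_eq (fun y => decide (PySem.List.pyGetD xs ((t : Nat) : Int) 0 ≤ y))
      have hlen := hperm.length_eq
      rw [show (((t : Nat) : Int) + 1).toNat = t + 1 from by omega]
      simp only [PySem.List.len_eq]
      omega
    rw [hfall, ih (by omega) _ _ hsort' hperm2,
      show ((t + 1 : Nat) : Int) = ((t : Nat) : Int) + 1 from by push_cast; ring,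
      PySem.List.pyRange_one_succ_right (show (0 : Int) ≤ ((t : Nat) : Int) by omega),
      List.reverse_append]
    rfl

-- ===== VERDICT (by name: the statement is the Claim_ definition above) =====
lemma ifmax (g : Int → Int) :
    (fun (m j : Int) => if m < g j then g j else m) = fun m j => max m (g j) := by
  funext m j; omega

theorem highest_drop_spec : Claim_equal_highest_drop := by
  intro N xs _
  unfold Spec_highest_drop
  rw [A_eq]
  unfold highest_drop_alt
  by_cases hnil : xs = []
  · subst hnil; rfl
  · have hn : 0 < xs.length := List.length_pos_of_ne_nil hnil
    have hsort : (xs.drop (xs.length - 1)).Pairwise (fun a b : Int => a ≤ b) := by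
      refine List.pairwise_iff_getElem.mpr ?_
      intro i j hi hj hij
      simp only [List.length_drop] at hi hj
      omega
    rw [PySem.List.slice_from_neg_one,
      show PySem.List.len xs - 2 = ((xs.length - 1 : Nat) : Int) - 1 from by
        simp only [PySem.List.len_eq]; omega,
      loop_eq N xs (xs.length - 1) (by omega) 0 _ hsort (List.Perm.refl _),
      show ((xs.length - 1 : Nat) : Int) = PySem.List.len xs - 1 from by
        simp only [PySem.List.len_eq]; omega,
      ifmax, fm_rev]
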